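-- pv_equiv track=rewrite | github.com/shrikrishnarb/amr-ros | colcon_ws/src/amr_vision/amr_vision/camera_detection_node.py | _highest_priority_semantic
-- ===== SOURCE A (Python) =====
-- OBSTACLE_CLASSES: set[str] = {"person", "pallet"}
--
-- _SEMANTIC_PRIORITY: list[str] = ["clear", "unknown_obstacle", "pallet", "person"]
--
-- def _highest_priority_semantic(class_names: list[str]) -> str:
--     """Return the highest-priority semantic label from a list of detected class names."""
--     best = "clear"
--     for name in class_names:
--         if name in OBSTACLE_CLASSES:
--             candidate = name
--         else:
--             candidate = "unknown_obstacle"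
--         if _SEMANTIC_PRIORITY.index(candidate) > _SEMANTIC_PRIORITY.index(best):
--             best = candidate
--     return best
-- ===== SOURCE B (Python) =====
-- OBSTACLE_CLASSES: set[str] = {"person", "pallet"}
--
-- _SEMANTIC_PRIORITY: list[str] = ["clear", "unknown_obstacle", "pallet", "person"]
--
-- def _highest_priority_semantic(class_names: list[str]) -> str:
--     """Return the highest-priority semantic label from a list of detected class names."""
--     if "person" in class_names:
--         return "person"
--     if "pallet" in class_names:
--         return "pallet"
--     if any(n not in OBSTACLE_CLASSES for n in class_names):
--         return "unknown_obstacle"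
--     return "clear"
-- ===== Notes on version B (the rewrite author's own statement) =====
-- stated objective: simpler
-- what changed: Replaced the max-tracking loop with index comparisons against _SEMANTIC_PRIORITY by an explicit priority-ordered chain of membership tests (person, then pallet, then any unknown name, else clear), maintaining no running best.
import Mathlib
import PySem

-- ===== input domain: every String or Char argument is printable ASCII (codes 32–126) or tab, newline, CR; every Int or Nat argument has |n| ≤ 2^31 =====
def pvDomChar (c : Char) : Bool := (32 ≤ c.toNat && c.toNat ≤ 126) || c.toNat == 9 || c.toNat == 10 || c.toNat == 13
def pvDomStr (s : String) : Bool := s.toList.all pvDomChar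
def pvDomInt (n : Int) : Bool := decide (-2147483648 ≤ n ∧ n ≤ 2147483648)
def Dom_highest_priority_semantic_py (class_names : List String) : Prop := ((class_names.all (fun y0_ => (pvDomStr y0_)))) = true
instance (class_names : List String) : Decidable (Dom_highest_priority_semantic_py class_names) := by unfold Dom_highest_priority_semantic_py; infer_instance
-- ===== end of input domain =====

set_option maxHeartbeats 1000000


-- ===== PORT A =====
-- B replaces A's running-best loop (index comparisons in _SEMANTIC_PRIORITY) by an explicit
-- priority-ordered chain of membership tests; objective: simpler.
def pvOBSTACLE_CLASSES : PySem.Set String := PySem.Set.ofList ["person", "pallet"]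
def pvSEMANTIC_PRIORITY : List String := ["clear", "unknown_obstacle", "pallet", "person"]
-- loop body of A; .index always succeeds here (candidate and best are in the priority list),
-- so the getD 0 default is never used
def pvStepA (best name : String) : String :=
  let candidate := if PySem.Set.contains pvOBSTACLE_CLASSES name then name else "unknown_obstacle"
  if ((PySem.List.index? pvSEMANTIC_PRIORITY candidate).getD 0)
      > ((PySem.List.index? pvSEMANTIC_PRIORITY best).getD 0) then candidate else best
def highest_priority_semantic_py (class_names : List String) : String :=
  class_names.foldl pvStepA "clear"

-- ===== PORT B =====
def highest_priority_semantic_py_alt (class_names : List String) : String :=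
  if class_names.contains "person" then "person"
  else if class_names.contains "pallet" then "pallet"
  else if class_names.any (fun n => !(PySem.Set.contains pvOBSTACLE_CLASSES n)) then "unknown_obstacle"
  else "clear"

-- ===== PRECONDITION & SPEC =====
def Spec_highest_priority_semantic_py (class_names : List String) (out : String) : Prop := out = highest_priority_semantic_py_alt class_names
instance (class_names : List String) (out : String) : Decidable (Spec_highest_priority_semantic_py class_names out) := by unfold Spec_highest_priority_semantic_py; infer_instance

-- ===== CLAIM (what is proved, stated in full; the proofs are below) =====
def Claim_equal_highest_priority_semantic_py : Prop := ∀ (class_names : List String), Dom_highest_priority_semantic_py class_names → Spec_highest_priority_semantic_py class_names (highest_priority_semantic_py class_names)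

-- ===== LEMMAS AND PROOFS =====

-- the four states A's loop can be in
def pvS4 (s : String) : Prop := s = "clear" ∨ s = "unknown_obstacle" ∨ s = "pallet" ∨ s = "person"
-- numeric rank of a state / of an incoming class name
def pvRnk (s : String) : Nat :=
  if s = "person" then 3 else if s = "pallet" then 2 else if s = "unknown_obstacle" then 1 else 0
def pvCrnk (s : String) : Nat := if s = "person" then 3 else if s = "pallet" then 2 else 1
def pvLbl (n : Nat) : String :=
  if n = 3 then "person" else if n = 2 then "pallet" else if n = 1 then "unknown_obstacle" else "clear"

theorem pvRnk_le (s : String) : pvRnk s ≤ 3 := by unfold pvRnk; split_ifs <;> omega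
theorem pvCrnk_le (s : String) : pvCrnk s ≤ 3 := by unfold pvCrnk; split_ifs <;> omega
theorem pvS4_lbl (n : Nat) : pvS4 (pvLbl n) := by unfold pvLbl pvS4; split_ifs <;> simp
theorem pvLbl_rnk {s : String} (h : pvS4 s) : pvLbl (pvRnk s) = s := by
  rcases h with h | h | h | h <;> subst h <;> decide
theorem pvRnk_lbl {n : Nat} (h : n ≤ 3) : pvRnk (pvLbl n) = n := by
  unfold pvLbl; split_ifs with h3 h2 h1 <;> simp_all [pvRnk] <;> omega

theorem pvStep_char (best name : String) (hb : pvS4 best) :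
    pvStepA best name = pvLbl (max (pvRnk best) (pvCrnk name)) := by
  by_cases hp : name = "person"
  · subst hp; rcases hb with h | h | h | h <;> subst h <;> decide
  · by_cases hq : name = "pallet"
    · subst hq; rcases hb with h | h | h | h <;> subst h <;> decide
    · have hm : name ∉ pvOBSTACLE_CLASSES := by
        simp [pvOBSTACLE_CLASSES, PySem.Set.ofList, hp, hq]
      rcases hb with h | h | h | h <;> subst h <;>
        simp [pvStepA, PySem.Set.contains, hm, hp, hq, pvRnk, pvCrnk, pvLbl,
              pvSEMANTIC_PRIORITY, PySem.List.index?] <;> decide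

theorem pvAlt_cons (x : String) (l : List String) :
    highest_priority_semantic_py_alt (x :: l) =
      pvLbl (max (pvCrnk x) (pvRnk (highest_priority_semantic_py_alt l))) := by
  by_cases hp : x = "person"
  · subst hp
    by_cases hP : "person" ∈ l <;> by_cases hQ : "pallet" ∈ l <;>
      by_cases hU : ∃ n ∈ l, n ∉ pvOBSTACLE_CLASSES <;>
        simp [highest_priority_semantic_py_alt, hP, hQ, hU, pvCrnk, pvRnk, pvLbl]
  · by_cases hq : x = "pallet"
    · subst hq
      by_cases hP : "person" ∈ l <;> by_cases hQ : "pallet" ∈ l <;>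
        by_cases hU : ∃ n ∈ l, n ∉ pvOBSTACLE_CLASSES <;>
          simp [highest_priority_semantic_py_alt, hP, hQ, hU, pvCrnk, pvRnk, pvLbl]
    · have hp' : ¬ "person" = x := fun h => hp h.symm
      have hq' : ¬ "pallet" = x := fun h => hq h.symm
      have hm : x ∉ pvOBSTACLE_CLASSES := by
        simp [pvOBSTACLE_CLASSES, PySem.Set.ofList, hp, hq]
      by_cases hP : "person" ∈ l <;> by_cases hQ : "pallet" ∈ l <;>
        by_cases hU : ∃ n ∈ l, n ∉ pvOBSTACLE_CLASSES <;>
          simp [highest_priority_semantic_py_alt, hp, hq, hp', hq', hm, hP, hQ, hU,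
                pvCrnk, pvRnk, pvLbl]

theorem pvAlt_S4 (l : List String) : pvS4 (highest_priority_semantic_py_alt l) := by
  unfold highest_priority_semantic_py_alt pvS4; split_ifs <;> simp

theorem pvFold_char (l : List String) : ∀ best, pvS4 best →
    l.foldl pvStepA best = pvLbl (max (pvRnk best) (pvRnk (highest_priority_semantic_py_alt l))) := by
  induction l with
  | nil =>
    intro best hb
    simp [highest_priority_semantic_py_alt, pvRnk]
    exact (pvLbl_rnk hb).symm
  | cons x l ih =>
    intro best hb
    have hstep := pvStep_char best x hb
    have hS : pvS4 (pvStepA best x) := hstep ▸ pvS4_lbl _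
    have hmax : max (pvRnk best) (pvCrnk x) ≤ 3 :=
      max_le (pvRnk_le _) (pvCrnk_le _)
    have hAlt : pvRnk (highest_priority_semantic_py_alt l) ≤ 3 := pvRnk_le _
    calc (x :: l).foldl pvStepA best
        = l.foldl pvStepA (pvStepA best x) := rfl
      _ = pvLbl (max (pvRnk (pvStepA best x)) (pvRnk (highest_priority_semantic_py_alt l))) :=
          ih _ hS
      _ = pvLbl (max (pvRnk best) (pvRnk (highest_priority_semantic_py_alt (x :: l)))) := by
          rw [hstep, pvRnk_lbl hmax, pvAlt_cons,
              pvRnk_lbl (max_le (pvCrnk_le _) hAlt)]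
          congr 1
          omega

-- ===== VERDICT (by name: the statement is the Claim_ definition above) =====
theorem highest_priority_semantic_py_spec : Claim_equal_highest_priority_semantic_py := by
  intro class_names _
  unfold Spec_highest_priority_semantic_py highest_priority_semantic_py
  rw [pvFold_char class_names "clear" (Or.inl rfl)]
  have : pvRnk "clear" = 0 := by decide
  rw [this, Nat.max_comm, Nat.max_zero, pvLbl_rnk (pvAlt_S4 _)]
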